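-- pv_equiv track=rewrite | github.com/Nanko-Nanev/python_oop | defining_classes_lab/rhombus_of_stars.py | print_rhombus
-- ===== SOURCE A (Python) =====
-- def print_rhombus(number):
--     res = ''
--     offset_counter = 1
--     row = 0
--     for i in range(number):
--         offset = " " * (number - 2 + offset_counter)
--         res += f'{offset}*' + f' *' * row + f'\n'
--         offset_counter -= 1
--         row += 1
--     row = number - 2
--     for j in range(number - 1):
--         offset = " " * (number + offset_counter)
--         res += f'{offset}*' + f' *' * row + f'\n'
--         offset_counter += 1
--         row -= 1
--     return res
-- ===== SOURCE B (Python) =====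
-- def print_rhombus(number):
--     rows = []
--     for k in range(2 * number - 1):
--         d = abs(k - (number - 1))
--         rows.append(" " * d + "*" + " *" * (number - d - 1) + "\n")
--     return "".join(rows)
-- ===== Notes on version B (the rewrite author's own statement) =====
-- stated objective: simpler
-- what changed: Replaces A's two sequential loops with three mutable accumulators (result string, offset_counter, row) by a single pass over all 2n-1 rows, computing each row directly from its distance to the middle row and joining the rows once.
import Mathlib
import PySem

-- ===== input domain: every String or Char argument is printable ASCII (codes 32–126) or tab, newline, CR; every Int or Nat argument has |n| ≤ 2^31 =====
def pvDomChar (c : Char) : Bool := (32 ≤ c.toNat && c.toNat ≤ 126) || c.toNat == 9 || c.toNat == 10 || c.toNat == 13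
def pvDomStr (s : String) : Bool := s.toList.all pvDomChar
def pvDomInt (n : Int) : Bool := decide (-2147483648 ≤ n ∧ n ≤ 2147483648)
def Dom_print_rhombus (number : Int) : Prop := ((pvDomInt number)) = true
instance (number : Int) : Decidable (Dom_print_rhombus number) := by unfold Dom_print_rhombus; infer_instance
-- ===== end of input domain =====

-- B replaces A's two sequential loops with mutable offset/row counters by one pass over all
-- 2n-1 rows, computing each row from its distance to the middle row (objective: simpler).

-- ===== PORT A =====
-- A builds the result string by two loops; res is kept as its character list, turned into a
-- String only at the end (Python str concatenation = list append on the characters, exact).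
def print_rhombus (number : Int) : String :=
  let st1 := (PySem.List.pyRange 0 number 1).foldl
    (fun (st : List Char × Int × Int) _i =>
      (st.1 ++ (PySem.List.pyRepeat [' '] (number - 2 + st.2.1) ++
        '*' :: (PySem.List.pyRepeat [' ', '*'] st.2.2 ++ ['\n'])), st.2.1 - 1, st.2.2 + 1))
    ([], 1, 0)
  let st2 := (PySem.List.pyRange 0 (number - 1) 1).foldl
    (fun (st : List Char × Int × Int) _j =>
      (st.1 ++ (PySem.List.pyRepeat [' '] (number + st.2.1) ++
        '*' :: (PySem.List.pyRepeat [' ', '*'] st.2.2 ++ ['\n'])), st.2.1 + 1, st.2.2 - 1))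
    (st1.1, st1.2.1, number - 2)
  String.ofList st2.1

-- ===== PORT B =====
def print_rhombus_alt (number : Int) : String :=
  String.ofList (((PySem.List.pyRange 0 (2 * number - 1) 1).map
    (fun k =>
      let d : Int := |k - (number - 1)|
      PySem.List.pyRepeat [' '] d ++
        '*' :: (PySem.List.pyRepeat [' ', '*'] (number - d - 1) ++ ['\n']))).flatten)

-- ===== PRECONDITION & SPEC =====
def Spec_print_rhombus (number : Int) (out : String) : Prop := out = print_rhombus_alt number
instance (number : Int) (out : String) : Decidable (Spec_print_rhombus number out) := by unfold Spec_print_rhombus; infer_instance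

-- ===== CLAIM (what is proved, stated in full; the proofs are below) =====
def Claim_equal_print_rhombus : Prop := ∀ (number : Int), Dom_print_rhombus number → Spec_print_rhombus number (print_rhombus number)

-- ===== LEMMAS AND PROOFS =====

-- one A-row, offset characters then the stars
def pvRow (off stars : Int) : List Char :=
  PySem.List.pyRepeat [' '] off ++ '*' :: (PySem.List.pyRepeat [' ', '*'] stars ++ ['\n'])

lemma pvRow_eq {o o' r r' : Int} (h1 : o = o') (h2 : r = r') : pvRow o r = pvRow o' r' := by
  rw [h1, h2]

-- A's first loop: res grows by one row per step, offset_counter decreases, row increases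
lemma loop1_eq (number : Int) (l : List Int) : ∀ (res : List Char) (oc row : Int),
    l.foldl (fun (st : List Char × Int × Int) _i =>
      (st.1 ++ (PySem.List.pyRepeat [' '] (number - 2 + st.2.1) ++
        '*' :: (PySem.List.pyRepeat [' ', '*'] st.2.2 ++ ['\n'])), st.2.1 - 1, st.2.2 + 1))
      (res, oc, row)
    = (res ++ ((List.range l.length).map
        (fun i : Nat => pvRow (number - 2 + oc - (i : Int)) (row + (i : Int)))).flatten,
       oc - l.length, row + l.length) := by
  induction l with
  | nil => intro res oc row; simp
  | cons x xs ih =>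
    intro res oc row
    simp only [List.foldl_cons, ih, List.length_cons, List.range_succ_eq_map,
      List.map_cons, List.map_map, List.flatten_cons, List.append_assoc, Prod.mk.injEq]
    refine ⟨?_, by push_cast; ring, by push_cast; ring⟩
    congr 1
    rw [← List.append_assoc]
    show pvRow _ _ ++ _ = _
    congr 1
    · exact pvRow_eq (by push_cast; ring) (by push_cast; ring)
    · congr 1
      apply List.map_congr_left; intro a _
      simp only [Function.comp]
      exact pvRow_eq (by push_cast; ring) (by push_cast; ring)

-- A's second loop: offset_counter increases, row decreases
lemma loop2_eq (number : Int) (l : List Int) : ∀ (res : List Char) (oc row : Int),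
    l.foldl (fun (st : List Char × Int × Int) _j =>
      (st.1 ++ (PySem.List.pyRepeat [' '] (number + st.2.1) ++
        '*' :: (PySem.List.pyRepeat [' ', '*'] st.2.2 ++ ['\n'])), st.2.1 + 1, st.2.2 - 1))
      (res, oc, row)
    = (res ++ ((List.range l.length).map
        (fun i : Nat => pvRow (number + oc + (i : Int)) (row - (i : Int)))).flatten,
       oc + l.length, row - l.length) := by
  induction l with
  | nil => intro res oc row; simp
  | cons x xs ih =>
    intro res oc row
    simp only [List.foldl_cons, ih, List.length_cons, List.range_succ_eq_map,
      List.map_cons, List.map_map, List.flatten_cons, List.append_assoc, Prod.mk.injEq]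
    refine ⟨?_, by push_cast; ring, by push_cast; ring⟩
    congr 1
    rw [← List.append_assoc]
    show pvRow _ _ ++ _ = _
    congr 1
    · exact pvRow_eq (by push_cast; ring) (by push_cast; ring)
    · congr 1
      apply List.map_congr_left; intro a _
      simp only [Function.comp]
      exact pvRow_eq (by push_cast; ring) (by push_cast; ring)

-- ===== VERDICT (by name: the statement is the Claim_ definition above) =====
theorem print_rhombus_spec : Claim_equal_print_rhombus := by
  intro number _
  unfold Spec_print_rhombus print_rhombus print_rhombus_alt
  rcases (by omega : number ≤ 0 ∨ 0 < number) with hle | hpos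
  · have h1 : number.toNat = 0 := by omega
    have h3 : (2 * number).toNat = 0 := by omega
    simp [PySem.List.pyRange_one, h1, h3]
  · set m := number.toNat with hm
    have hn : number = (m : Int) := by omega
    have hm1 : 1 ≤ m := by omega
    simp only [PySem.List.pyRange_one]
    have h1 : (number - 0).toNat = m := by omega
    have h2 : (number - 1 - 0).toNat = m - 1 := by omega
    have h3 : (2 * number - 1 - 0).toNat = m + (m - 1) := by omega
    rw [h1, h2, h3]
    rw [loop1_eq number]
    simp only [List.length_map, List.length_range]
    rw [loop2_eq number]
    simp only [List.length_map, List.length_range, List.nil_append,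
      List.range_add, List.map_append, List.map_map, List.flatten_append]
    congr 1
    congr 1
    · -- top half: rows 0..m-1
      congr 1
      apply List.map_congr_left; intro i hi
      have hi' : i < m := List.mem_range.mp hi
      simp only [Function.comp]
      show pvRow _ _ = pvRow _ _
      refine pvRow_eq ?_ ?_ <;>
        rw [abs_of_nonpos (by omega)] <;> omega
    · -- bottom half: rows m..2m-2
      congr 1
      apply List.map_congr_left; intro j hj
      have hj' : j < m - 1 := List.mem_range.mp hj
      simp only [Function.comp]
      show pvRow _ _ = pvRow _ _
      refine pvRow_eq ?_ ?_ <;>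
        rw [abs_of_nonneg (by omega)] <;> omega
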